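-- pv_equiv track=rewrite | github.com/miliar/Code_Jam_Webscraper | solutions_python/Problem_181/1116.py | solve
-- ===== SOURCE A (Python) =====
-- def solve(S):
--     curr_front = 64
--     curr_str = ''
--     for c in S:
--         if ord(c) >= curr_front:
--             curr_str = c + curr_str
--             curr_front = ord(c)
--         else:
--             curr_str += c
--     return curr_str
-- ===== SOURCE B (Python) =====
-- def solve(S):
--     # Staged-passes formulation: first tabulate prefix maxima pm (pm[i] = max of 64
--     # and ords of S[:i]), then emit the record positions (ord >= pm) scanning
--     # right-to-left, followed by the non-record positions scanning left-to-right.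
--     n = len(S)
--     pm = [64] * (n + 1)
--     for i in range(n):
--         o = ord(S[i])
--         pm[i + 1] = pm[i] if pm[i] > o else o
--     head = ''.join(S[i] for i in range(n - 1, -1, -1) if ord(S[i]) >= pm[i])
--     tail = ''.join(S[i] for i in range(n) if ord(S[i]) < pm[i])
--     return head + tail
-- ===== Notes on version B (the rewrite author's own statement) =====
-- stated objective: faster
-- what changed: B replaces A's stateful single pass with repeated string prepends/appends by a staged-passes formulation: tabulate the prefix-maximum array once, then two index filters (right-to-left for record chars, left-to-right for the rest) joined once.
import Mathlib
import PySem

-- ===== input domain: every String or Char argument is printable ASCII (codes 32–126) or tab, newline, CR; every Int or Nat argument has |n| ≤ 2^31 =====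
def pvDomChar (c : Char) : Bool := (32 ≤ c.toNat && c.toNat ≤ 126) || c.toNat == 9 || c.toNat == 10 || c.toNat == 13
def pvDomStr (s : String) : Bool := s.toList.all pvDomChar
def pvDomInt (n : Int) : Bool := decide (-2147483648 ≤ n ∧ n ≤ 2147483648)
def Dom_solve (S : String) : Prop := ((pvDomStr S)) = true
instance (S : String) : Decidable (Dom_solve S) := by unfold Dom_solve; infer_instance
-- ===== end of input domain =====

-- B replaces A's stateful prepend/append pass by a prefix-maximum table plus two filter passes joined once (faster in a timing run).

-- ===== PORT A =====
-- A's loop: state (curr_front, curr_str); prepend and bump curr_front if ord(c) >= curr_front, else append.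
def solveLoop (cs : List Char) (front : Nat) (acc : List Char) : List Char :=
  match cs with
  | [] => acc
  | c :: rest =>
    if c.toNat ≥ front then solveLoop rest c.toNat (c :: acc)
    else solveLoop rest front (acc ++ [c])

def solve (S : String) : String := String.mk (solveLoop S.toList 64 [])

-- ===== PORT B =====
-- Pass 1 of Source B: the prefix-maximum table, here fused with the char it precedes:
-- annotate cs m = [(S[i], pm[i])], pm[i+1] = pm[i] if pm[i] > ord S[i] else ord S[i].
def annotate (cs : List Char) (m : Nat) : List (Char × Nat) :=
  match cs with
  | [] => []
  | c :: rest => (c, m) :: annotate rest (if m > c.toNat then m else c.toNat)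

-- Passes 2 and 3: filter the annotated pairs right-to-left (records) / left-to-right (rest), join once.
def solve_alt (S : String) : String :=
  let ps := annotate S.toList 64
  String.mk (((ps.reverse.filter (fun p => p.1.toNat ≥ p.2)).map Prod.fst) ++
             ((ps.filter (fun p => p.1.toNat < p.2)).map Prod.fst))

-- ===== PRECONDITION & SPEC =====
def Spec_solve (S : String) (out : String) : Prop := out = solve_alt S
instance (S : String) (out : String) : Decidable (Spec_solve S out) := by unfold Spec_solve; infer_instance

-- ===== CLAIM (what is proved, stated in full; the proofs are below) =====
def Claim_equal_solve : Prop := ∀ (S : String), Dom_solve S → Spec_solve S (solve S)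

-- ===== LEMMAS AND PROOFS =====
theorem loop_eq_annotate (cs : List Char) : ∀ (f : Nat) (acc : List Char),
    solveLoop cs f acc =
      (((annotate cs f).filter (fun p => p.1.toNat ≥ p.2)).map Prod.fst).reverse ++ acc ++
      ((annotate cs f).filter (fun p => p.1.toNat < p.2)).map Prod.fst := by
  induction cs with
  | nil => intro f acc; simp [solveLoop, annotate]
  | cons c rest ih =>
    intro f acc
    by_cases h : c.toNat ≥ f
    · have hm : ¬ (f > c.toNat) := by omega
      have hlt : ¬ (c.toNat < f) := by omega
      simp [solveLoop, annotate, h, hm, ih, List.append_assoc]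
    · have hm : f > c.toNat := by omega
      have hlt : c.toNat < f := by omega
      simp [solveLoop, annotate, h, hm, ih, List.append_assoc]

-- ===== VERDICT (by name: the statement is the Claim_ definition above) =====
theorem solve_spec : Claim_equal_solve := by
  intro S _
  unfold Spec_solve solve solve_alt
  have h := loop_eq_annotate S.toList 64 []
  simp only [List.append_nil] at h
  simp [h, List.filter_reverse, List.map_reverse]
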